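-- pv_equiv track=rewrite | github.com/QSOLKCB/QEC | src/qec/analysis/shared_memory_fabric.py | _memory_payload_mapping
-- ===== SOURCE A (Python) =====
-- from collections.abc import Mapping, Sequence
--
-- def _invalid_input() -> ValueError:
--     return ValueError("INVALID_INPUT")
--
-- def _memory_payload_mapping(payload_pairs: Sequence[tuple[object, object]]) -> dict[str, object]:
--     seen_keys: set[str] = set()
--     normalized: dict[str, object] = {}
--
--     for item in payload_pairs:
--         if not isinstance(item, tuple) or len(item) != 2:
--             raise _invalid_input()
--         key, value = item
--         if not isinstance(key, str):
--             raise _invalid_input()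
--         if key in seen_keys:
--             raise _invalid_input()
--         seen_keys.add(key)
--         normalized[key] = value
--
--     return normalized
-- ===== SOURCE B (Python) =====
-- def _invalid_input() -> ValueError:
--     return ValueError("INVALID_INPUT")
--
-- def _memory_payload_mapping(payload_pairs):
--     items = list(payload_pairs)
--     # pass 1: shape validation
--     for item in items:
--         if not isinstance(item, tuple) or len(item) != 2 or not isinstance(item[0], str):
--             raise _invalid_input()
--     # pass 2: sort the keys and scan adjacent entries for a duplicate
--     keys = sorted(k for k, _ in items)
--     for a, b in zip(keys, keys[1:]):
--         if a == b:
--             raise _invalid_input()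
--     # pass 3: build the mapping
--     return dict(items)
-- ===== Notes on version B (the rewrite author's own statement) =====
-- stated objective: alternative
-- what changed: Replaces the incremental seen_keys set with three staged passes: validate shapes, then detect duplicate keys by sorting the keys and scanning adjacent entries, then build the dict with dict(); same ValueError('INVALID_INPUT') on every error path.
import Mathlib
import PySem

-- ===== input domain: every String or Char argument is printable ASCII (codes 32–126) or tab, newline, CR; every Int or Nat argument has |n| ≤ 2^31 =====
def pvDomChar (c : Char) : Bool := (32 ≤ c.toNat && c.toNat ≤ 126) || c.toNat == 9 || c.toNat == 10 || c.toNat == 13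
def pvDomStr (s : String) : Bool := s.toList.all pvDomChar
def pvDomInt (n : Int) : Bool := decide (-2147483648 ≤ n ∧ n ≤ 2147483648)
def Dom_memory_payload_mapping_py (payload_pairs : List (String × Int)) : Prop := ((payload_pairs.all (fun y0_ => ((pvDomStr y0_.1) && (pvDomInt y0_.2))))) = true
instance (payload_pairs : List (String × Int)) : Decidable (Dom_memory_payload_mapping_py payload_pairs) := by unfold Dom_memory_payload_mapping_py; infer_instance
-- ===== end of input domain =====

-- B replaces the incremental seen_keys set with staged passes (validate; sort keys and scan
-- adjacents for a duplicate; build the dict); both raise ValueError('INVALID_INPUT') on a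
-- duplicate key, so those inputs are outside Pre_.

-- ===== PORT A =====
-- loop over payload_pairs keeping seen_keys and the normalized dict; under the type
-- convention the tuple/str isinstance checks always pass; the duplicate-key raise
-- is unreachable inside Pre_ (we return [] there, arbitrarily).
def pvGoA : List (String × Int) → PySem.Set String → PySem.Dict String Int → List (String × Int)
  | [], _, normalized => normalized.items
  | (key, value) :: rest, seen, normalized =>
      if PySem.Set.contains seen key then []  -- raise _invalid_input(): outside Pre_
      else pvGoA rest (PySem.Set.add seen key) (normalized.insert key value)

def memory_payload_mapping_py (payload_pairs : List (String × Int)) : List (String × Int) :=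
  pvGoA payload_pairs [] PySem.Dict.empty

-- ===== PORT B =====
-- the 'for a, b in zip(keys, keys[1:])' adjacent scan
def pvHasAdjDup : List String → Bool
  | a :: b :: t => a == b || pvHasAdjDup (b :: t)
  | _ => false

def memory_payload_mapping_py_alt (payload_pairs : List (String × Int)) : List (String × Int) :=
  -- shape-validation pass always succeeds under the type convention
  let keys := PySem.List.sorted (payload_pairs.map Prod.fst) (fun k => k) false
  if pvHasAdjDup keys then []  -- raise _invalid_input(): outside Pre_
  else (payload_pairs.foldl (fun d item => d.insert item.1 item.2) PySem.Dict.empty).items  -- dict(items)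

-- ===== PRECONDITION & SPEC =====
-- A raises ValueError('INVALID_INPUT') exactly on a duplicate key (B raises there too); nodup keys stay inside.
def Pre_memory_payload_mapping_py (payload_pairs : List (String × Int)) : Prop :=
  (payload_pairs.map Prod.fst).Nodup
instance (payload_pairs : List (String × Int)) : Decidable (Pre_memory_payload_mapping_py payload_pairs) := by unfold Pre_memory_payload_mapping_py; infer_instance

def pvWitness_memory_payload_mapping_py : (List (String × Int)) := [("a", 1), ("b", 2)]

def Spec_memory_payload_mapping_py (payload_pairs : List (String × Int)) (out : List (String × Int)) : Prop := out = memory_payload_mapping_py_alt payload_pairs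
instance (payload_pairs : List (String × Int)) (out : List (String × Int)) : Decidable (Spec_memory_payload_mapping_py payload_pairs out) := by unfold Spec_memory_payload_mapping_py; infer_instance

-- ===== CLAIM (what is proved, stated in full; the proofs are below) =====
def Claim_equal_memory_payload_mapping_py : Prop := ∀ (payload_pairs : List (String × Int)), Dom_memory_payload_mapping_py payload_pairs → Pre_memory_payload_mapping_py payload_pairs → Spec_memory_payload_mapping_py payload_pairs (memory_payload_mapping_py payload_pairs)

-- ===== LEMMAS AND PROOFS =====

-- A's loop over fresh, distinct keys appends each pair to the dict.
theorem pvGoA_eq (ps : List (String × Int)) :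
    ∀ (seen : PySem.Set String) (d : PySem.Dict String Int),
      (ps.map Prod.fst).Nodup →
      (∀ k ∈ ps.map Prod.fst, k ∉ seen ∧ d.contains k = false) →
      pvGoA ps seen d = d.items ++ ps := by
  induction ps with
  | nil => intro seen d _ _; simp [pvGoA]
  | cons p rest ih =>
    rcases p with ⟨k, v⟩
    intro seen d hnd hfresh
    have hk := hfresh k (by simp)
    have hseen : PySem.Set.contains seen k = false := by
      cases h : PySem.Set.contains seen k
      · rfl
      · exact absurd ((PySem.Set.contains_iff seen k).mp h) hk.1
    simp only [pvGoA, hseen, Bool.false_eq_true, if_false]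
    have hrest : pvGoA rest (PySem.Set.add seen k) (d.insert k v)
        = (d.insert k v).items ++ rest := by
      apply ih
      · simp only [List.map_cons, List.nodup_cons] at hnd
        exact hnd.2
      · intro k' hk'
        have hne : k' ≠ k := by
          simp only [List.map_cons, List.nodup_cons] at hnd
          intro h; exact hnd.1 (h ▸ hk')
        have hf := hfresh k' (by simp [hk'])
        constructor
        · intro hmem
          rcases (PySem.Set.mem_add seen k k').mp hmem with h | h
          · exact hf.1 h
          · exact hne h
        · rw [PySem.Dict.contains_insert, hf.2]
          simp [hne]
    rw [hrest, PySem.Dict.items_insert_of_not_contains d v hk.2]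
    simp

-- a list without duplicates has no equal adjacent entries
theorem pvHasAdjDup_eq_false (l : List String) (h : l.Nodup) : pvHasAdjDup l = false := by
  induction l with
  | nil => rfl
  | cons a t ih =>
    cases t with
    | nil => rfl
    | cons b t' =>
      simp only [List.nodup_cons, List.mem_cons] at h
      have hab : a ≠ b := fun he => h.1 (Or.inl he)
      have := ih (by simp [List.nodup_cons]; exact ⟨h.2.1, h.2.2⟩)
      simp [pvHasAdjDup, hab, this]

-- dict(items) over distinct keys lists the pairs in order
theorem foldB_items (ps : List (String × Int))
    (hnd : (ps.map Prod.fst).Nodup) :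
    (ps.foldl (fun d item => d.insert item.1 item.2) PySem.Dict.empty).items = ps := by
  have := PySem.Dict.items_foldl_insert_fresh (l := ps) (k := Prod.fst) (v := Prod.snd)
    (d := PySem.Dict.empty) (by intro a _; simp) hnd
  simpa using this

-- ===== VERDICT (by name: the statement is the Claim_ definition above) =====
theorem memory_payload_mapping_py_spec : Claim_equal_memory_payload_mapping_py := by
  intro ps _ hpre
  unfold Spec_memory_payload_mapping_py memory_payload_mapping_py memory_payload_mapping_py_alt
  have hA : pvGoA ps [] PySem.Dict.empty = PySem.Dict.empty.items ++ ps := by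
    apply pvGoA_eq ps [] PySem.Dict.empty hpre
    intro k _; exact ⟨by simp, by simp⟩
  have hsortnd : (PySem.List.sorted (ps.map Prod.fst) (fun k => k) false).Nodup :=
    (PySem.List.sorted_perm (ps.map Prod.fst) (fun k => k) false).nodup_iff.mpr hpre
  have hadj := pvHasAdjDup_eq_false _ hsortnd
  simp only [PySem.Dict.empty] at hA ⊢
  rw [hadj]
  simp [hA]
  exact (foldB_items ps hpre).symm
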